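-- pv_equiv track=rewrite | github.com/EmanuelGarciaR/EjercicioValidadorClaveActividad | validadorclave/modelo/validador.py | contiene_calisto
-- ===== SOURCE A (Python) =====
-- def contiene_calisto(clave: str) -> bool:
--     """
--             cant_mayus = 0
--             if clave.lower() in "calisto":
--                 for letter in clave:
--                     if letter.isupper():
--                         cant_mayus += 1
--                 if cant_mayus >= 2 and cant_mayus != len(clave):
--                     return True
--             return False
--     """
--     if "calisto" in clave.lower():
--         counter = 0
--         for item in clave:
--             if item in "CALISTO":
--                 counter += 1
--
--         if 2 <= counter < 7:
--             return True
--     return False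
-- ===== SOURCE B (Python) =====
-- def contiene_calisto(clave: str) -> bool:
--     if "calisto" not in clave.lower():
--         return False
--     stripped = clave
--     for ch in "CALISTO":
--         stripped = stripped.replace(ch, "")
--     matches = len(clave) - len(stripped)
--     return 2 <= matches <= 6
-- ===== Notes on version B (the rewrite author's own statement) =====
-- stated objective: alternative
-- what changed: B counts by deletion instead of by scanning: it strips each of the seven pattern letters from the string with successive str.replace passes and derives the match count as the length difference, replacing A's single-pass running counter with per-character membership tests.
import Mathlib
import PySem

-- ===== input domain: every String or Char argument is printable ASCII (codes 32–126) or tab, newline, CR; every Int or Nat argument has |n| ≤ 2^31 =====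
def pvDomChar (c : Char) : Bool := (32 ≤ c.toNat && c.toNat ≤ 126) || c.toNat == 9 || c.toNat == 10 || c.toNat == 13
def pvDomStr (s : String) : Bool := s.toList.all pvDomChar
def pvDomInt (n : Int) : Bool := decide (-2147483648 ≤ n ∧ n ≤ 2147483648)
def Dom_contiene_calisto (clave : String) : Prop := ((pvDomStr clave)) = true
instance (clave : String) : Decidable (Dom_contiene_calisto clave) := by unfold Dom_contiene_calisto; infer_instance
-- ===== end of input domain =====

-- ===== PORT A =====
-- B differs from A by counting via deletion: it strips the seven pattern letters from the
-- string with repeated str.replace and uses the length difference (alternative mechanism,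
-- same return value).
def contiene_calisto (clave : String) : Bool :=
  if PySem.Str.isIn "calisto" (PySem.Str.lower clave) then
    let counter : Int := clave.toList.foldl
      (fun acc item => if PySem.Chars.isIn [item] "CALISTO".toList then acc + 1 else acc) 0
    if 2 ≤ counter ∧ counter < 7 then true else false
  else false

-- ===== PORT B =====
def contiene_calisto_alt (clave : String) : Bool :=
  if !(PySem.Str.isIn "calisto" (PySem.Str.lower clave)) then false
  else
    let stripped := "CALISTO".toList.foldl
      (fun s ch => PySem.Str.replace s (String.ofList [ch]) "") clave
    let nMatches : Int := PySem.Str.len clave - PySem.Str.len stripped  -- 'matches' is reserved in Lean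
    decide (2 ≤ nMatches ∧ nMatches ≤ 6)

-- ===== PRECONDITION & SPEC =====
def Spec_contiene_calisto (clave : String) (out : Bool) : Prop := out = contiene_calisto_alt clave
instance (clave : String) (out : Bool) : Decidable (Spec_contiene_calisto clave out) := by unfold Spec_contiene_calisto; infer_instance

-- ===== CLAIM (what is proved, stated in full; the proofs are below) =====
def Claim_equal_contiene_calisto : Prop := ∀ (clave : String), Dom_contiene_calisto clave → Spec_contiene_calisto clave (contiene_calisto clave)

-- ===== LEMMAS AND PROOFS =====

-- replace.go with a single-character needle and empty replacement is a filter
theorem replace_go_single (c : Char) :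
    ∀ (fuel : Nat) (l acc : List Char), l.length ≤ fuel →
      PySem.Chars.replace.go [c] [] fuel l acc
        = acc.reverse ++ l.filter (fun x => !(x == c)) := by
  intro fuel
  induction fuel with
  | zero =>
    intro l acc h
    have hl : l = [] := List.eq_nil_of_length_eq_zero (Nat.le_zero.mp h)
    subst hl
    simp [PySem.Chars.replace.go]
  | succ n ih =>
    intro l acc h
    cases l with
    | nil => simp [PySem.Chars.replace.go]
    | cons x t =>
      have ht : t.length ≤ n := by simpa using h
      by_cases hx : x = c
      · subst hx
        have hpre : [x].isPrefixOf (x :: t) = true := by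
          simp [List.isPrefixOf]
        simp only [PySem.Chars.replace.go, hpre, if_true, List.length_cons, List.length_nil,
          List.drop_succ_cons, List.drop_zero, List.reverse_nil, List.nil_append]
        rw [ih t acc ht]
        simp
      · have hpre : [c].isPrefixOf (x :: t) = false := by
          simp [List.isPrefixOf]
          exact fun hh => hx hh.symm
        simp only [PySem.Chars.replace.go, hpre, Bool.false_eq_true, if_false]
        rw [ih t (x :: acc) ht]
        have hxc : (x == c) = false := by simp [hx]
        simp [hxc]

theorem replace_single (c : Char) (l : List Char) :
    PySem.Chars.replace l [c] [] = l.filter (fun x => !(x == c)) := by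
  rw [PySem.Chars.replace]
  simp only [List.isEmpty_cons, Bool.false_eq_true, if_false]
  rw [replace_go_single c l.length l [] le_rfl]
  simp

theorem countP_not_add (p : Char → Bool) (l : List Char) :
    l.countP (fun x => !(p x)) + l.countP p = l.length := by
  induction l with
  | nil => simp
  | cons x t ih =>
    simp only [List.countP_cons, List.length_cons]
    cases hp : p x
    · simp
      omega
    · simp
      omega

theorem mem_CALISTO_iff (c : Char) :
    PySem.Chars.isIn [c] "CALISTO".toList = decide (c ∈ "CALISTO".toList) := by
  by_cases h : c ∈ "CALISTO".toList
  · rw [decide_eq_true h, PySem.Chars.isIn_iff_infix, List.singleton_infix_iff]; exact h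
  · rw [decide_eq_false h, PySem.Chars.isIn_eq_false_iff, List.singleton_infix_iff]; exact h

-- successive one-letter filters over S = one filter by non-membership in S
theorem foldl_filter_mem : ∀ (S : List Char) (l : List Char),
    S.foldl (fun l ch => l.filter (fun x => !(x == ch))) l
      = l.filter (fun x => !(decide (x ∈ S))) := by
  intro S
  induction S with
  | nil => intro l; simp
  | cons c S ihS =>
    intro l
    simp only [List.foldl_cons]
    rw [ihS, List.filter_filter]
    apply List.filter_congr
    intro x _
    by_cases hx : x = c <;> simp [hx]

-- stripping the seven letters one by one leaves exactly the characters outside the set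
theorem stripped_toList (clave : String) :
    ("CALISTO".toList.foldl
      (fun s ch => PySem.Str.replace s (String.ofList [ch]) "") clave).toList
    = clave.toList.filter (fun x => !(decide (x ∈ "CALISTO".toList))) := by
  have step : ∀ (S : List Char) (s : String),
      (S.foldl (fun s ch => PySem.Str.replace s (String.ofList [ch]) "") s).toList
        = S.foldl (fun l ch => l.filter (fun x => !(x == ch))) s.toList := by
    intro S
    induction S with
    | nil => intro s; rfl
    | cons c S ihS =>
      intro s
      simp only [List.foldl_cons]
      rw [ihS]
      congr 1
      rw [PySem.Str.toList_replace]
      simp only [String.toList_ofList]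
      exact replace_single c s.toList
  rw [step, foldl_filter_mem]

-- ===== VERDICT (by name: the statement is the Claim_ definition above) =====
theorem contiene_calisto_spec : Claim_equal_contiene_calisto := by
  intro clave _
  unfold Spec_contiene_calisto contiene_calisto contiene_calisto_alt
  cases hb : PySem.Str.isIn "calisto" (PySem.Str.lower clave) with
  | false => simp only [Bool.not_false, Bool.false_eq_true, if_false, if_pos]
  | true =>
    simp only [Bool.not_true, Bool.false_eq_true, if_false, if_true]
    have hcount : clave.toList.foldl
        (fun acc item => if PySem.Chars.isIn [item] "CALISTO".toList then acc + 1 else acc) (0 : Int)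
        = (clave.toList.countP (fun c => decide (c ∈ "CALISTO".toList)) : Int) := by
      rw [PySem.List.foldl_if_add_one
        (p := fun item => PySem.Chars.isIn [item] "CALISTO".toList) (l := clave.toList) (a := (0 : Int))]
      rw [zero_add]
      congr 1
      apply List.countP_congr
      intro x _
      rw [mem_CALISTO_iff]
    have hlen : PySem.Str.len clave
        - PySem.Str.len ("CALISTO".toList.foldl
            (fun s ch => PySem.Str.replace s (String.ofList [ch]) "") clave)
        = (clave.toList.countP (fun c => decide (c ∈ "CALISTO".toList)) : Int) := by
      rw [PySem.Str.len_eq, PySem.Str.len_eq, stripped_toList]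
      rw [← List.countP_eq_length_filter]
      have := countP_not_add (fun c => decide (c ∈ "CALISTO".toList)) clave.toList
      have hle : clave.toList.countP (fun x => !(decide (x ∈ "CALISTO".toList))) ≤ clave.toList.length :=
        List.countP_le_length
      omega
    rw [hcount, hlen]
    split_ifs with h2
    · symm; rw [decide_eq_true_iff]; exact ⟨h2.1, by omega⟩
    · symm; rw [decide_eq_false_iff_not]; intro hc; exact h2 ⟨hc.1, by omega⟩
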